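-- pv_equiv track=rewrite | github.com/mistervaibhav/graveyard | graves/advent-of-code/2023/1/main.py | get_calibration_value_for_part_one
-- ===== SOURCE A (Python) =====
-- def get_calibration_value_for_part_one(line: str):
--     digits = []
--
--     for character in line:
--         if character.isdigit():
--             digits.append(int(character))
--
--     if len(digits) == 1:
--         return int(f"{digits[0]}{digits[0]}")
--
--     return int(f"{digits[0]}{digits[-1]}")
-- ===== SOURCE B (Python) =====
-- def get_calibration_value_for_part_one(line: str):
--     i = 0
--     while not line[i].isdigit():
--         i += 1
--     j = len(line) - 1
--     while not line[j].isdigit():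
--         j -= 1
--     return int(line[i]) * 10 + int(line[j])
-- ===== Notes on version B (the rewrite author's own statement) =====
-- stated objective: simpler
-- what changed: Instead of building a list of all digits and parsing an f-string concatenation back through int(), B scans one index forward to the first digit and one index backward to the last digit and returns first*10+last arithmetically, dropping the redundant single-digit branch.
import Mathlib
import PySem

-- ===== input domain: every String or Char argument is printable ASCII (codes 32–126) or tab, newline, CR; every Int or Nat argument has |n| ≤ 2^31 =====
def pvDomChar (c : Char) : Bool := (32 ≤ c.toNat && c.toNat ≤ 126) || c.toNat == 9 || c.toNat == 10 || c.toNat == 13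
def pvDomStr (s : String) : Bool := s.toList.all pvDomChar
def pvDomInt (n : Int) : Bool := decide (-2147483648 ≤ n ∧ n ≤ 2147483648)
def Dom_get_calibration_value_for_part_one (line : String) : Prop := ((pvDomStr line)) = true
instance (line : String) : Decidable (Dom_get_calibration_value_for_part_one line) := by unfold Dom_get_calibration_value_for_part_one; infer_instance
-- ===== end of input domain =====

-- B replaces A's digit-list + f-string-and-int() reconstruction by a forward scan to the
-- first digit and a backward scan to the last digit, combined as first*10+last (simpler).

-- ===== PORT A =====
def get_calibration_value_for_part_one (line : String) : Int :=
  let digits : List Int := line.toList.foldl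
    (fun acc c => if PySem.Chars.isdigit c then acc ++ [(PySem.Int.ofChars? [c]).getD 0] else acc) []
  if digits.length == 1 then
    (PySem.Int.ofStr? (PySem.Int.toStr ((PySem.List.pyGet? digits 0).getD 0) ++
       PySem.Int.toStr ((PySem.List.pyGet? digits 0).getD 0))).getD 0
  else
    (PySem.Int.ofStr? (PySem.Int.toStr ((PySem.List.pyGet? digits 0).getD 0) ++
       PySem.Int.toStr ((PySem.List.pyGet? digits (-1)).getD 0))).getD 0

-- ===== PORT B =====
-- forward while-loop: advance past non-digits, return the first digit character
def pvScanFwd : List Char → Option Char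
  | [] => none
  | c :: cs => if PySem.Chars.isdigit c then some c else pvScanFwd cs

def get_calibration_value_for_part_one_alt (line : String) : Int :=
  -- backward while-loop from the end = forward scan of the reversed character list
  match pvScanFwd line.toList, pvScanFwd line.toList.reverse with
  | some a, some b => (PySem.Int.ofChars? [a]).getD 0 * 10 + (PySem.Int.ofChars? [b]).getD 0
  | _, _ => 0

-- ===== PRECONDITION & SPEC =====
-- Pre_ excludes strings with no digit character: there A (digits[0]) and B (line[i]) both raise IndexError.
def Pre_get_calibration_value_for_part_one (line : String) : Prop :=
  line.toList.any PySem.Chars.isdigit = true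
instance (line : String) : Decidable (Pre_get_calibration_value_for_part_one line) := by
  unfold Pre_get_calibration_value_for_part_one; infer_instance
def pvWitness_get_calibration_value_for_part_one : String := "a1b2c"

def Spec_get_calibration_value_for_part_one (line : String) (out : Int) : Prop := out = get_calibration_value_for_part_one_alt line
instance (line : String) (out : Int) : Decidable (Spec_get_calibration_value_for_part_one line out) := by unfold Spec_get_calibration_value_for_part_one; infer_instance

-- ===== CLAIM (what is proved, stated in full; the proofs are below) =====
def Claim_equal_get_calibration_value_for_part_one : Prop := ∀ (line : String), Dom_get_calibration_value_for_part_one line → Pre_get_calibration_value_for_part_one line → Spec_get_calibration_value_for_part_one line (get_calibration_value_for_part_one line)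

-- ===== LEMMAS AND PROOFS =====

-- single digit character parses to its value
theorem pv_ofChars_digit (c : Char) (h : PySem.Chars.isdigit c = true) :
    PySem.Int.ofChars? [c] = some ((c.toNat : Int) - 48) := by
  simp [PySem.Chars.isdigit, Char.le_def] at h
  obtain ⟨h1, h2⟩ := h
  have l1 : 48 ≤ c.toNat := h1
  have l2 : c.toNat ≤ 57 := h2
  have hc : c = Char.ofNat c.toNat := by simp [Char.ofNat_toNat]
  rw [hc]
  interval_cases h3 : c.toNat <;> decide

theorem pv_digit_bounds (c : Char) (h : PySem.Chars.isdigit c = true) :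
    0 ≤ (PySem.Int.ofChars? [c]).getD 0 ∧ (PySem.Int.ofChars? [c]).getD 0 ≤ 9 := by
  simp only [pv_ofChars_digit c h, Option.getD_some]
  have := h
  simp [PySem.Chars.isdigit, Char.le_def] at this
  obtain ⟨h1, h2⟩ := this
  have l1 : 48 ≤ c.toNat := h1
  have l2 : c.toNat ≤ 57 := h2
  omega

-- int(f"{x}{y}") = 10*x + y for single-digit values
theorem pv_comb (x y : Int) (hx0 : 0 ≤ x) (hx9 : x ≤ 9) (hy0 : 0 ≤ y) (hy9 : y ≤ 9) :
    (PySem.Int.ofStr? (PySem.Int.toStr x ++ PySem.Int.toStr y)).getD 0 = x * 10 + y := by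
  interval_cases x <;> interval_cases y <;> decide

theorem pv_scanFwd_eq (cs : List Char) :
    pvScanFwd cs = (cs.filter PySem.Chars.isdigit).head? := by
  induction cs with
  | nil => rfl
  | cons c cs ih =>
    by_cases h : PySem.Chars.isdigit c = true
    · simp [pvScanFwd, h]
    · simp [pvScanFwd, h, ih]

-- ===== VERDICT (by name: the statement is the Claim_ definition above) =====
theorem get_calibration_value_for_part_one_spec : Claim_equal_get_calibration_value_for_part_one := by
  intro line _ hpre
  unfold Spec_get_calibration_value_for_part_one
  unfold Pre_get_calibration_value_for_part_one at hpre
  set isd := PySem.Chars.isdigit with hisd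
  have hne : line.toList.filter isd ≠ [] := by
    simp only [List.any_eq_true] at hpre
    obtain ⟨c, hc, hd⟩ := hpre
    intro h
    have : c ∈ line.toList.filter isd := List.mem_filter.mpr ⟨hc, hd⟩
    simp [h] at this
  obtain ⟨d, ds, hf⟩ := List.exists_cons_of_ne_nil hne
  -- last element of the filtered list
  have hlast : (line.toList.filter isd).getLast? = some ((line.toList.filter isd).getLast hne) :=
    List.getLast?_eq_some_getLast (h := hne)
  set l := (line.toList.filter isd).getLast hne with hl
  have hdmem : d ∈ line.toList.filter isd := by rw [hf]; exact List.mem_cons_self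
  have hlmem : l ∈ line.toList.filter isd := List.getLast_mem hne
  have hddig : isd d = true := (List.mem_filter.mp hdmem).2
  have hldig : isd l = true := (List.mem_filter.mp hlmem).2
  obtain ⟨hd0, hd9⟩ := pv_digit_bounds d hddig
  obtain ⟨hl0, hl9⟩ := pv_digit_bounds l hldig
  -- B's value
  have hB : get_calibration_value_for_part_one_alt line =
      (PySem.Int.ofChars? [d]).getD 0 * 10 + (PySem.Int.ofChars? [l]).getD 0 := by
    unfold get_calibration_value_for_part_one_alt
    rw [pv_scanFwd_eq, pv_scanFwd_eq, List.filter_reverse, List.head?_reverse, ← hisd, hlast, hf]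
    rfl
  -- A's digits list
  unfold get_calibration_value_for_part_one
  rw [PySem.List.foldl_append_if]
  simp only [List.nil_append, ← hisd, hf]
  by_cases hone : ds = []
  · -- single digit: l = d
    have hld : l = d := by
      rw [hl]
      simp [hf, hone]
    subst hone
    simp only [List.map_cons, List.map_nil, List.length_cons, List.length_nil,
      PySem.List.pyGet?_zero_cons, Option.getD_some]
    rw [if_pos (by rfl)]
    rw [pv_comb _ _ hd0 hd9 hd0 hd9, hB, hld]
  · obtain ⟨e, es, he⟩ := List.exists_cons_of_ne_nil hone
    have hlen : ((d :: ds).map (fun c => (PySem.Int.ofChars? [c]).getD 0)).length ≠ 1 := by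
      simp [he]
    rw [if_neg (by simpa using hlen)]
    have hget0 : PySem.List.pyGet? ((d :: ds).map (fun c => (PySem.Int.ofChars? [c]).getD 0)) 0
        = some ((PySem.Int.ofChars? [d]).getD 0) := by
      exact PySem.List.pyGet?_zero_cons ..
    have hgetm1 : PySem.List.pyGet? ((d :: ds).map (fun c => (PySem.Int.ofChars? [c]).getD 0)) (-1)
        = some ((PySem.Int.ofChars? [l]).getD 0) := by
      rw [PySem.List.pyGet?_neg_one, List.getLast?_map, ← hf, hlast]
      rfl
    rw [hget0, hgetm1]
    simp only [Option.getD_some]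
    rw [pv_comb _ _ hd0 hd9 hl0 hl9, hB]
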